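-- pv_equiv track=rewrite | github.com/claire-lovisa/sparkling-advent-of-code | 2018/day2/day2.py | part_one
-- ===== SOURCE A (Python) =====
-- def hasOccurence(string, expected_occurence):
--     """Pour chaque lettre de la string, on va compter le nb d'occurences de la
--     lettre (sentence.count('a')). Des qu'on en trouve une qui va bien on repond
--     1, sinon 0."""
--
--     for letter in string:
--         occurence = string.count(letter)
--         if(occurence == expected_occurence):
--             return 1
--     return 0
--
-- def part_one(ids):
--     '''
--     Question:
--         What is the checksum for your list of box IDs?
--
--     Check the ids with 2 times the same letter in it, same with 3 time,
--     and then multiply the two numbers.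
--     '''
--
--     number_of_two_times_occurences = 0
--     number_of_three_times_occurences = 0
--
--     for n in ids:
--         if(hasOccurence(n, 2)):
--             number_of_two_times_occurences += 1
--
--         if(hasOccurence(n, 3)):
--             number_of_three_times_occurences += 1
--
--     return number_of_two_times_occurences * number_of_three_times_occurences
-- ===== SOURCE B (Python) =====
-- def run_lengths(chars):
--     """Run-length scan of an already-sorted char list: lengths of consecutive runs."""
--     lengths = []
--     while chars:
--         c = chars[0]
--         k = 1
--         while k < len(chars) and chars[k] == c:
--             k += 1
--         lengths.append(k)
--         chars = chars[k:]
--     return lengths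
--
-- def part_one(ids):
--     twos = 0
--     threes = 0
--     for n in ids:
--         runs = run_lengths(sorted(n))
--         if 2 in runs:
--             twos += 1
--         if 3 in runs:
--             threes += 1
--     return twos * threes
-- ===== Notes on version B (the rewrite author's own statement) =====
-- stated objective: alternative
-- what changed: A tests each id by scanning it letter by letter and re-counting that letter with string.count (a quadratic per-id scan, done separately for 2 and 3); B sorts each id's characters once and run-length-scans the sorted list, then checks whether 2 and 3 occur among the run lengths.
import Mathlib
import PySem

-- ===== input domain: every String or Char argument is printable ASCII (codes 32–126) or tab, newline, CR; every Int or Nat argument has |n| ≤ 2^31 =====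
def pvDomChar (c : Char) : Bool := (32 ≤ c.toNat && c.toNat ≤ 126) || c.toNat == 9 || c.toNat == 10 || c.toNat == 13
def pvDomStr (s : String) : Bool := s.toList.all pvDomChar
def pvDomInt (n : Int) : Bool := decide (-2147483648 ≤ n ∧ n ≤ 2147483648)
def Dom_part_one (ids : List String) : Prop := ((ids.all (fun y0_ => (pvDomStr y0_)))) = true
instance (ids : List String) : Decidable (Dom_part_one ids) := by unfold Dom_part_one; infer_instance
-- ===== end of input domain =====

-- B replaces A's per-letter repeated .count scans by sorting each id and run-length
-- scanning the sorted characters once (objective: alternative decomposition).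

-- ===== PORT A =====
-- 'for letter in string: occurence = string.count(letter); if occurence == expected: return 1' / 'return 0'
def hasOccAux (s : List Char) (expected : Int) : List Char → Int
  | [] => 0
  | letter :: rest =>
      if (PySem.Chars.count s [letter] : Int) = expected then 1
      else hasOccAux s expected rest

def hasOccurence (s : String) (expected : Int) : Int :=
  hasOccAux s.toList expected s.toList

def part_one (ids : List String) : Int :=
  let p := ids.foldl (fun (st : Int × Int) n =>
    let st := if hasOccurence n 2 ≠ 0 then (st.1 + 1, st.2) else st
    if hasOccurence n 3 ≠ 0 then (st.1, st.2 + 1) else st) (0, 0)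
  p.1 * p.2

-- ===== PORT B =====
-- Source B's while loop over the shrinking list 'chars', as the same structural recursion:
-- each step measures the run of the head char (k) and continues on chars[k:].
def runLengthsAux : List Char → List Int → List Int
  | [], acc => acc
  | c :: rest, acc =>
      runLengthsAux (rest.dropWhile (· == c))
        (acc ++ [(1 + (rest.takeWhile (· == c)).length : Int)])
  termination_by l _ => l.length
  decreasing_by
    simp only [List.length_cons]
    exact Nat.lt_succ_of_le (List.Sublist.length_le (List.dropWhile_sublist _))

def run_lengths (chars : List Char) : List Int := runLengthsAux chars []

def part_one_alt (ids : List String) : Int :=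
  let p := ids.foldl (fun (st : Int × Int) n =>
    let runs := run_lengths (PySem.List.sorted n.toList (fun x => x) false)
    let st := if (2 : Int) ∈ runs then (st.1 + 1, st.2) else st
    if (3 : Int) ∈ runs then (st.1, st.2 + 1) else st) (0, 0)
  p.1 * p.2

-- ===== PRECONDITION & SPEC =====
def Spec_part_one (ids : List String) (out : Int) : Prop := out = part_one_alt ids
instance (ids : List String) (out : Int) : Decidable (Spec_part_one ids out) := by unfold Spec_part_one; infer_instance

-- ===== CLAIM (what is proved, stated in full; the proofs are below) =====
def Claim_equal_part_one : Prop := ∀ (ids : List String), Dom_part_one ids → Spec_part_one ids (part_one ids)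

-- ===== LEMMAS AND PROOFS =====

-- Python str.count with a single-character needle is the character count.
theorem chars_count_go_single (c : Char) : ∀ (fuel : Nat) (l : List Char) (acc : Nat),
    l.length ≤ fuel → PySem.Chars.count.go [c] fuel l acc = acc + l.count c := by
  intro fuel
  induction fuel with
  | zero => intro l acc h; simp at h; simp [h, PySem.Chars.count.go]
  | succ n ih =>
    intro l acc h
    cases l with
    | nil => simp [PySem.Chars.count.go]
    | cons x t =>
      rw [PySem.Chars.count.go]
      simp only [List.isPrefixOf, List.length_cons] at *
      by_cases hx : x = c
      · subst hx
        simp [ih t (acc + 1) (by omega)]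
        ring
      · simp [hx, Ne.symm hx, ih t acc (by omega)]

theorem chars_count_single (s : List Char) (c : Char) :
    PySem.Chars.count s [c] = s.count c := by
  simp [PySem.Chars.count, chars_count_go_single c s.length s 0 (le_refl _)]

-- A's early-return loop answers 1 exactly when some visited letter's count matches.
theorem hasOccAux_ne_zero_iff (s : List Char) (e : Int) (l : List Char) :
    hasOccAux s e l ≠ 0 ↔ ∃ c ∈ l, (s.count c : Int) = e := by
  induction l with
  | nil => simp [hasOccAux]
  | cons x t ih =>
    simp only [hasOccAux, chars_count_single]
    by_cases hx : (s.count x : Int) = e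
    · simp [hx]
    · simp [hx, ih]

theorem not_mem_dropWhile_sorted (c : Char) :
    ∀ (l : List Char), (∀ y ∈ l, c ≤ y) → l.Pairwise (· ≤ ·) →
      c ∉ l.dropWhile (· == c) := by
  intro l
  induction l with
  | nil => simp
  | cons y r ih =>
    intro hle hp
    by_cases hy : y = c
    · subst hy
      simp only [List.dropWhile_cons, beq_self_eq_true]
      exact ih (fun z hz => hle z (List.mem_cons_of_mem _ hz)) (List.Pairwise.sublist (List.sublist_cons_self _ _) hp)
    · have : (y == c) = false := by simp [hy]
      simp only [List.dropWhile_cons, this]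
      intro hmem
      rcases List.mem_cons.mp hmem with h | h
      · exact hy h.symm
      · have h1 : c ≤ y := hle y (List.mem_cons_self)
        have h2 : y ≤ c := (List.pairwise_cons.mp hp).1 c h
        exact hy (le_antisymm h2 h1)

-- run lengths of a sorted list are exactly the multiplicities of its elements
theorem mem_runLengthsAux (l : List Char) (acc : List Int) (x : Int)
    (hp : l.Pairwise (· ≤ ·)) :
    x ∈ runLengthsAux l acc ↔ x ∈ acc ∨ ∃ c ∈ l, (l.count c : Int) = x := by
  match l with
  | [] => simp [runLengthsAux]
  | c :: rest =>
      have hle : ∀ y ∈ rest, c ≤ y := (List.pairwise_cons.mp hp).1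
      have hpr : rest.Pairwise (· ≤ ·) := (List.pairwise_cons.mp hp).2
      set t := rest.takeWhile (· == c) with ht
      set d := rest.dropWhile (· == c) with hd
      have hsplit : t ++ d = rest := List.takeWhile_append_dropWhile
      have htc : ∀ y ∈ t, y = c := by
        intro y hy
        have := List.mem_takeWhile_imp hy
        simpa [eq_comm] using (beq_iff_eq.mp this)
      have hdsub : d.Sublist rest := List.dropWhile_sublist _
      have hpd : d.Pairwise (· ≤ ·) := List.Pairwise.sublist hdsub hpr
      have hcd : c ∉ d := not_mem_dropWhile_sorted c rest hle hpr
      have hcount_t : t.count c = t.length :=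
        List.count_eq_length.mpr (fun b hb => (htc b hb).symm)
      have hcount_d : d.count c = 0 := List.count_eq_zero.mpr hcd
      have hcount_c : (c :: rest).count c = t.length + 1 := by
        rw [← hsplit]
        simp [List.count_append, hcount_t, hcount_d]
      have hcount_d' : ∀ c' ∈ d, (c :: rest).count c' = d.count c' := by
        intro c' hc'
        have hne : c' ≠ c := fun h => hcd (h ▸ hc')
        have hct : t.count c' = 0 :=
          List.count_eq_zero.mpr (fun hmem => hne (htc c' hmem))
        rw [← hsplit]
        simp [List.count_append, hct, Ne.symm hne]
      rw [runLengthsAux]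
      have hlen : d.length < (c :: rest).length := by
        simp only [List.length_cons]
        exact Nat.lt_succ_of_le (List.Sublist.length_le hdsub)
      rw [mem_runLengthsAux d _ x hpd]
      constructor
      · rintro (h | ⟨c', hc', hcnt⟩)
        · rcases List.mem_append.mp h with h | h
          · exact Or.inl h
          · refine Or.inr ⟨c, List.mem_cons_self, ?_⟩
            simp only [List.mem_singleton] at h
            rw [← ht] at h
            rw [hcount_c]
            push_cast
            omega
        · refine Or.inr ⟨c', List.mem_cons_of_mem _ ((hsplit ▸ List.mem_append_right t hc')), ?_⟩
          rw [hcount_d' c' hc', hcnt]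
      · rintro (h | ⟨c', hc', hcnt⟩)
        · exact Or.inl (List.mem_append_left _ h)
        · rcases List.mem_cons.mp hc' with rfl | hmem
          · refine Or.inl (List.mem_append_right _ ?_)
            rw [hcount_c] at hcnt
            simp only [List.mem_singleton]
            rw [← ht]
            push_cast at hcnt ⊢
            omega
          · rcases List.mem_append.mp (hsplit ▸ hmem : c' ∈ t ++ d) with hmt | hmd
            · have : c' = c := htc c' hmt
              subst this
              refine Or.inl (List.mem_append_right _ ?_)
              rw [hcount_c] at hcnt
              simp only [List.mem_singleton]
              rw [← ht]
              push_cast at hcnt ⊢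
              omega
            · exact Or.inr ⟨c', hmd, by rw [← hcount_d' c' hmd, hcnt]⟩
  termination_by l.length
  decreasing_by simpa using hlen

-- per-id agreement of the two tests
theorem has_iff_run (s : String) (e : Int) :
    (hasOccurence s e ≠ 0) ↔ e ∈ run_lengths (PySem.List.sorted s.toList (fun x => x) false) := by
  have hperm : (PySem.List.sorted s.toList (fun x => x) false).Perm s.toList :=
    PySem.List.sorted_perm _ _ _
  have hpw : (PySem.List.sorted s.toList (fun x => x) false).Pairwise (· ≤ ·) := by
    have := PySem.List.sorted_pairwise s.toList (fun x => x)
    simpa using this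
  rw [hasOccurence, hasOccAux_ne_zero_iff, run_lengths,
      mem_runLengthsAux _ [] e hpw]
  simp only [List.not_mem_nil, false_or]
  constructor
  · rintro ⟨c, hc, hcnt⟩
    exact ⟨c, hperm.mem_iff.mpr hc, by rw [hperm.count_eq]; exact hcnt⟩
  · rintro ⟨c, hc, hcnt⟩
    exact ⟨c, hperm.mem_iff.mp hc, by rw [← hperm.count_eq]; exact hcnt⟩

-- ===== VERDICT (by name: the statement is the Claim_ definition above) =====
theorem part_one_spec : Claim_equal_part_one := by
  intro ids _
  unfold Spec_part_one part_one part_one_alt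
  have hstep : (fun (st : Int × Int) n =>
      let st := if hasOccurence n 2 ≠ 0 then (st.1 + 1, st.2) else st
      if hasOccurence n 3 ≠ 0 then (st.1, st.2 + 1) else st) =
      (fun (st : Int × Int) n =>
      let runs := run_lengths (PySem.List.sorted n.toList (fun x => x) false)
      let st := if (2 : Int) ∈ runs then (st.1 + 1, st.2) else st
      if (3 : Int) ∈ runs then (st.1, st.2 + 1) else st) := by
    funext st n
    simp only [has_iff_run n 2, has_iff_run n 3]
  rw [hstep]
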